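-- pv_equiv track=rewrite | github.com/Avery246813579/tweet-generator | source/markov_model.py | count_sorter
-- ===== SOURCE A (Python) =====
-- def count_sorter(dicto):
--     recurrents, count = [], []
--
--     for word in dicto:
--         num = dicto[word]
--
--         if num not in recurrents:
--             recurrents.append(num)
--             num_list = (num, [word])
--             count.append(num_list)
--         else:
--             for index in count:
--                 if num == index[0]:
--                     index[1].append(word)
--
--     return sorted(count)
-- ===== SOURCE B (Python) =====
-- def count_sorter(dicto):
--     items = sorted(dicto.items(), key=lambda kv: kv[1])
--     result = []
--     for word, num in items:
--         if result and result[-1][0] == num: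
--             result[-1][1].append(word)
--         else:
--             result.append((num, [word]))
--     return result
-- ===== Notes on version B (the rewrite author's own statement) =====
-- stated objective: simpler
-- what changed: Replaces A's per-word linear scans over the recurrents/bucket lists (plus a final sort of the buckets) with one stable sort of the items by count followed by a single linear grouping pass.
import Mathlib
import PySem

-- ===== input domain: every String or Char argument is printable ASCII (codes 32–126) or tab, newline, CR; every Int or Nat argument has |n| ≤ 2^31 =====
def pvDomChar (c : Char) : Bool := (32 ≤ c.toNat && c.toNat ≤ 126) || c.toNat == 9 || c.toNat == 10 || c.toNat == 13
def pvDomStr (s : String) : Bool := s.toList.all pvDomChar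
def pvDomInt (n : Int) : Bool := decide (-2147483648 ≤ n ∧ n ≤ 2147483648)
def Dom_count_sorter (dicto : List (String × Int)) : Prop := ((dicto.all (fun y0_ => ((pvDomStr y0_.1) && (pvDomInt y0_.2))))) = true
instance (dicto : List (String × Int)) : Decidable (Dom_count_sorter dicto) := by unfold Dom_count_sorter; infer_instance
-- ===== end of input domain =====

-- B replaces A's per-word scans over the bucket list by one stable sort on the count followed
-- by a single grouping pass (objective: simpler).

-- ===== PORT A =====
-- one iteration of A's for-loop: state = (recurrents, count)
def pvStepA (st : List Int × List (Int × List String)) (kv : String × Int) :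
    List Int × List (Int × List String) :=
  let num := kv.2
  if num ∉ st.1 then
    (st.1 ++ [num], st.2 ++ [(num, [kv.1])])
  else
    -- inner loop: append word to the bucket whose first component equals num
    (st.1, st.2.map (fun p => if p.1 = num then (p.1, p.2 ++ [kv.1]) else p))

def count_sorter (dicto : List (String × Int)) : List (Int × List String) :=
  let st := dicto.foldl pvStepA ([], [])
  -- `sorted(count)`: the nums in count are pairwise distinct by construction, so Python's
  -- tuple comparison never reaches the word lists; sorting on the first component is exact.
  PySem.List.sorted st.2 (fun p => p.1) false

-- ===== PORT B =====
-- one iteration of B's grouping loop: result[-1] is res.getLast?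
def pvGroupStep (res : List (Int × List String)) (kv : String × Int) : List (Int × List String) :=
  match res.getLast? with
  | some last =>
      if last.1 = kv.2 then res.dropLast ++ [(last.1, last.2 ++ [kv.1])]
      else res ++ [(kv.2, [kv.1])]
  | none => res ++ [(kv.2, [kv.1])]

def count_sorter_alt (dicto : List (String × Int)) : List (Int × List String) :=
  let items := PySem.List.sorted dicto (fun kv => kv.2) false
  items.foldl pvGroupStep []

-- ===== PRECONDITION & SPEC =====
def Spec_count_sorter (dicto : List (String × Int)) (out : List (Int × List String)) : Prop := out = count_sorter_alt dicto
instance (dicto : List (String × Int)) (out : List (Int × List String)) : Decidable (Spec_count_sorter dicto out) := by unfold Spec_count_sorter; infer_instance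

-- ===== CLAIM (what is proved, stated in full; the proofs are below) =====
def Claim_equal_count_sorter : Prop := ∀ (dicto : List (String × Int)), Dom_count_sorter dicto → Spec_count_sorter dicto (count_sorter dicto)

-- ===== LEMMAS AND PROOFS =====

-- distinct values in first-occurrence order (A's `recurrents` list)
def pvDvals (vs : List Int) : List Int := vs.foldl (fun a x => if x ∈ a then a else a ++ [x]) []

-- the bucket of count value n: n paired with the words of xs carrying value n, in xs order
def pvBucket (xs : List (String × Int)) (n : Int) : Int × List String :=
  (n, (xs.filter (fun p => decide (p.2 = n))).map (fun p => p.1))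

theorem pvDvals_append (vs : List Int) (x : Int) :
    pvDvals (vs ++ [x]) = if x ∈ pvDvals vs then pvDvals vs else pvDvals vs ++ [x] := by
  simp [pvDvals, List.foldl_append]

theorem mem_pvDvals (vs : List Int) (a : Int) : a ∈ pvDvals vs ↔ a ∈ vs := by
  induction vs using List.reverseRecOn with
  | nil => simp [pvDvals]
  | append_singleton vs x ih =>
    rw [pvDvals_append]
    split_ifs with h
    · simp only [List.mem_append, List.mem_singleton, ih]
      constructor
      · exact fun hv => Or.inl hv
      · rintro (hv | rfl)
        · exact hv
        · exact ih.mp h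
    · simp [List.mem_append, ih]

theorem nodup_pvDvals (vs : List Int) : (pvDvals vs).Nodup := by
  induction vs using List.reverseRecOn with
  | nil => simp [pvDvals]
  | append_singleton vs x ih =>
    rw [pvDvals_append]
    split_ifs with h
    · exact ih
    · rw [List.nodup_append]
      refine ⟨ih, List.nodup_singleton _, ?_⟩
      intro a ha b hb
      rw [List.mem_singleton] at hb
      subst hb
      exact fun he => h (he ▸ ha)

theorem pairwise_lt_pvDvals (vs : List Int) (h : vs.Pairwise (· ≤ ·)) :
    (pvDvals vs).Pairwise (· < ·) := by
  induction vs using List.reverseRecOn with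
  | nil => simp [pvDvals]
  | append_singleton vs x ih =>
    obtain ⟨h1, -, h2⟩ := List.pairwise_append.mp h
    rw [pvDvals_append]
    split_ifs with hm
    · exact ih h1
    · refine List.pairwise_append.mpr ⟨ih h1, List.pairwise_singleton _ _, ?_⟩
      intro a ha b hb
      have hax : a ∈ vs := (mem_pvDvals vs a).mp ha
      have hbx : b = x := List.mem_singleton.mp hb
      subst hbx
      have hle : a ≤ b := h2 a hax b (List.mem_singleton.mpr rfl)
      have hne : a ≠ b := fun he => hm (he ▸ ha)
      exact lt_of_le_of_ne hle hne

theorem getLast?_of_pairwise_lt (l : List Int) (x : Int) (hp : l.Pairwise (· < ·))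
    (hx : x ∈ l) (hub : ∀ y ∈ l, y ≤ x) : l.getLast? = some x := by
  induction l with
  | nil => cases hx
  | cons a t ih =>
    cases t with
    | nil =>
      have : x = a := by simpa using hx
      simp [this]
    | cons b t' =>
      have hp' : (b :: t').Pairwise (· < ·) := hp.of_cons
      have hab : a < b := (List.pairwise_cons.mp hp).1 b (by simp)
      have hx' : x ∈ b :: t' := by
        rcases List.mem_cons.mp hx with rfl | hx'
        · exact absurd (hub b (by simp)) (by simpa using hab)
        · exact hx'
      have := ih hp' hx' (fun y hy => hub y (List.mem_cons_of_mem a hy))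
      simpa [List.getLast?_cons_cons] using this

theorem dropLast_append_of_getLast? {α : Type} (l : List α) (x : α)
    (h : l.getLast? = some x) : l.dropLast ++ [x] = l := by
  induction l with
  | nil => simp at h
  | cons a t ih =>
    cases t with
    | nil =>
      have : a = x := by simpa using h
      simp [this]
    | cons b t' =>
      have h' : (b :: t').getLast? = some x := by simpa [List.getLast?_cons_cons] using h
      have := ih h'
      simpa [List.dropLast_cons₂] using this

theorem filter_eq_nil_of_not_mem (xs : List (String × Int)) (n : Int)
    (h : n ∉ xs.map (fun p => p.2)) : xs.filter (fun p => decide (p.2 = n)) = [] := by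
  rw [List.filter_eq_nil_iff]
  intro p hp
  simp only [decide_eq_true_eq]
  intro he
  exact h (List.mem_map.mpr ⟨p, hp, he⟩)

-- A's loop invariant
theorem pvBucket_append (xs : List (String × Int)) (p : String × Int) (n : Int) :
    pvBucket (xs ++ [p]) n =
      if n = p.2 then ((pvBucket xs n).1, (pvBucket xs n).2 ++ [p.1]) else pvBucket xs n := by
  unfold pvBucket
  rw [List.filter_append]
  by_cases he : n = p.2
  · simp [he.symm]
  · have h2 : ¬p.2 = n := fun h => he h.symm
    simp [he, h2]

theorem pvInvA (xs : List (String × Int)) :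
    xs.foldl pvStepA ([], []) =
      (pvDvals (xs.map (fun p => p.2)),
       (pvDvals (xs.map (fun p => p.2))).map (pvBucket xs)) := by
  induction xs using List.reverseRecOn with
  | nil => simp [pvDvals]
  | append_singleton xs p ih =>
    rw [List.foldl_append, ih]
    simp only [List.foldl_cons, List.foldl_nil, List.map_append, List.map_cons, List.map_nil]
    rw [pvDvals_append]
    unfold pvStepA
    by_cases hm : p.2 ∈ pvDvals (xs.map (fun p => p.2))
    · rw [if_neg (not_not_intro hm), if_pos hm]
      refine Prod.ext rfl ?_
      rw [List.map_map]
      refine List.map_congr_left (fun n _ => ?_)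
      simp only [Function.comp_apply]
      rw [pvBucket_append]
      by_cases he : n = p.2
      · subst he
        simp [pvBucket]
      · have : (pvBucket xs n).1 = n := rfl
        simp [this, he]
    · rw [if_pos hm, if_neg hm]
      have hm' : p.2 ∉ xs.map (fun p => p.2) := fun h => hm ((mem_pvDvals _ _).mpr h)
      have hmap : List.map (pvBucket (xs ++ [p])) (pvDvals (xs.map (fun p => p.2)) ++ [p.2])
          = List.map (pvBucket xs) (pvDvals (xs.map (fun p => p.2))) ++ [(p.2, [p.1])] := by
        rw [List.map_append, List.map_cons, List.map_nil]
        congr 1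
        · refine List.map_congr_left (fun n hn => ?_)
          have hne : n ≠ p.2 := fun he => hm (he ▸ hn)
          rw [pvBucket_append, if_neg hne]
        · rw [pvBucket_append, if_pos rfl]
          simp [pvBucket, filter_eq_nil_of_not_mem xs p.2 hm']
      exact Prod.ext rfl hmap.symm

-- stability of the sort: filtering one count value commutes with sorting by count
theorem pvInsFilter (ys : List (String × Int)) (x : String × Int) (n : Int)
    (h : ys.Pairwise (fun a b => a.2 ≤ b.2)) :
    (PySem.List.insertBy (fun a b => decide (a.2 < b.2)) x ys).filter (fun p => decide (p.2 = n)) =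
      if x.2 = n then ys.filter (fun p => decide (p.2 = n)) ++ [x]
      else ys.filter (fun p => decide (p.2 = n)) := by
  induction ys with
  | nil =>
    simp only [PySem.List.insertBy]
    by_cases he : x.2 = n <;> simp [he]
  | cons y t ih =>
    simp only [PySem.List.insertBy]
    by_cases hlt : x.2 < y.2
    · simp only [hlt, decide_true, if_true]
      by_cases he : x.2 = n
      · have hnil : (y :: t).filter (fun p => decide (p.2 = n)) = [] := by
          rw [List.filter_eq_nil_iff]
          intro q hq
          simp only [decide_eq_true_eq]
          have hyq : y.2 ≤ q.2 := by
            rcases List.mem_cons.mp hq with rfl | hq'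
            · exact le_refl _
            · exact (List.pairwise_cons.mp h).1 q hq'
          intro he2
          omega
        simp [he, hnil]
      · simp [he, List.filter_cons]
    · simp only [hlt, decide_false]
      have ih' := ih h.of_cons
      by_cases he : x.2 = n <;> by_cases hy : y.2 = n <;>
        simp [he, hy, ih']

theorem pvSortedAppend (xs : List (String × Int)) (x : String × Int) :
    PySem.List.sorted (xs ++ [x]) (fun kv => kv.2) false
      = PySem.List.insertBy (fun a b => decide (a.2 < b.2)) x
          (PySem.List.sorted xs (fun kv => kv.2) false) := by
  rw [PySem.List.sorted_eq_foldl_insertBy, PySem.List.sorted_eq_foldl_insertBy,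
    List.foldl_append]
  rfl

theorem pvStab (xs : List (String × Int)) (n : Int) :
    (PySem.List.sorted xs (fun kv => kv.2) false).filter (fun p => decide (p.2 = n)) =
      xs.filter (fun p => decide (p.2 = n)) := by
  induction xs using List.reverseRecOn with
  | nil => simp [PySem.List.sorted_eq_foldl_insertBy]
  | append_singleton xs x ih =>
    rw [pvSortedAppend,
      pvInsFilter _ _ _ (PySem.List.sorted_pairwise xs (fun kv => kv.2)),
      List.filter_append, ih]
    by_cases he : x.2 = n <;> simp [he]

-- B's grouping loop on a list sorted by count value
theorem pvGroup (ys : List (String × Int)) (h : ys.Pairwise (fun a b => a.2 ≤ b.2)) :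
    ys.foldl pvGroupStep [] = (pvDvals (ys.map (fun p => p.2))).map (pvBucket ys) := by
  induction ys using List.reverseRecOn with
  | nil => simp [pvDvals]
  | append_singleton ys p ih =>
    obtain ⟨h1, -, h2⟩ := List.pairwise_append.mp h
    have hub : ∀ q ∈ ys, q.2 ≤ p.2 := fun q hq => h2 q hq p (by simp)
    rw [List.foldl_append, ih h1]
    simp only [List.foldl_cons, List.foldl_nil, List.map_append, List.map_cons, List.map_nil]
    rw [pvDvals_append]
    set dv := pvDvals (ys.map (fun p => p.2)) with hdv
    by_cases hm : p.2 ∈ ys.map (fun q => q.2)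
    · have hmdv : p.2 ∈ dv := (mem_pvDvals _ _).mpr hm
      rw [if_pos hmdv]
      have hplt : dv.Pairwise (· < ·) := by
        refine pairwise_lt_pvDvals _ ?_
        exact (List.pairwise_map).mpr h1
      have hubdv : ∀ y ∈ dv, y ≤ p.2 := by
        intro y hy
        rcases List.mem_map.mp ((mem_pvDvals _ _).mp hy) with ⟨q, hq, rfl⟩
        exact hub q hq
      have hlast : dv.getLast? = some p.2 := getLast?_of_pairwise_lt dv p.2 hplt hmdv hubdv
      have hdec : dv.dropLast ++ [p.2] = dv := dropLast_append_of_getLast? dv p.2 hlast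
      have hnotin : p.2 ∉ dv.dropLast := by
        have hnd : (dv.dropLast ++ [p.2]).Nodup := by rw [hdec]; exact nodup_pvDvals _
        exact fun hc => (List.disjoint_of_nodup_append hnd) hc (by simp)
      unfold pvGroupStep
      rw [List.getLast?_map, hlast]
      simp only [Option.map_some]
      have hc : (pvBucket ys p.2).1 = p.2 := rfl
      rw [if_pos hc]
      have hmapdec : List.map (pvBucket ys) dv
          = List.map (pvBucket ys) dv.dropLast ++ [pvBucket ys p.2] := by
        conv_lhs => rw [← hdec]
        rw [List.map_append, List.map_cons, List.map_nil]
      rw [hmapdec, List.dropLast_concat]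
      conv_rhs => rw [← hdec]
      rw [List.map_append, List.map_cons, List.map_nil]
      congr 1
      · refine List.map_congr_left (fun n hn => ?_)
        have hne : n ≠ p.2 := fun he => hnotin (he ▸ hn)
        rw [pvBucket_append, if_neg hne]
      · rw [pvBucket_append, if_pos rfl]
    · have hmdv : p.2 ∉ dv := fun hc => hm ((mem_pvDvals _ _).mp hc)
      rw [if_neg hmdv]
      have hsame : dv.map (pvBucket (ys ++ [p])) = dv.map (pvBucket ys) := by
        refine List.map_congr_left (fun n hn => ?_)
        have hnx : n ∈ ys.map (fun q => q.2) := (mem_pvDvals _ _).mp hn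
        have hne : n ≠ p.2 := fun he => hm (he ▸ hnx)
        rw [pvBucket_append, if_neg hne]
      have hlastb : pvBucket (ys ++ [p]) p.2 = (p.2, [p.1]) := by
        rw [pvBucket_append, if_pos rfl]
        simp [pvBucket, filter_eq_nil_of_not_mem ys p.2 hm]
      rw [List.map_append, hsame]
      unfold pvGroupStep
      rw [List.getLast?_map]
      cases hdvl : dv.getLast? with
      | none =>
        have hnil : dv = [] := List.getLast?_eq_none_iff.mp hdvl
        simp [hnil, hlastb]
      | some m =>
        have hmm : m ∈ dv := List.mem_of_getLast? hdvl
        have hmne : m ≠ p.2 := by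
          intro he
          exact hmdv (he ▸ hmm)
        simp only [Option.map_some]
        have hfst : (pvBucket ys m).1 = m := rfl
        rw [if_neg (by rw [hfst]; exact hmne)]
        simp [hlastb]

theorem pairwise_lt_of_le_nodup (l : List Int) (h1 : l.Pairwise (· ≤ ·)) (h2 : l.Nodup) :
    l.Pairwise (· < ·) := by
  have := List.Pairwise.and h1 h2
  exact this.imp (fun {a b} hab => lt_of_le_of_ne hab.1 hab.2)

-- ===== VERDICT (by name: the statement is the Claim_ definition above) =====
theorem count_sorter_spec : Claim_equal_count_sorter := by
  intro dicto _
  unfold Spec_count_sorter count_sorter count_sorter_alt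
  rw [pvInvA]
  set vals := dicto.map (fun p => p.2) with hvals
  set dv := pvDvals vals with hdv
  set items := PySem.List.sorted dicto (fun kv => kv.2) false with hitems
  set sdv := PySem.List.sorted dv (fun x => x) false with hsdv
  have hA : PySem.List.sorted (dv.map (pvBucket dicto)) (fun p => p.1) false
      = sdv.map (pvBucket dicto) := by
    refine PySem.List.sorted_eq_of_perm_of_pairwise_lt _ _ _ ?_ ?_
    · exact (PySem.List.sorted_perm dv _ _).map _
    · rw [List.pairwise_map]
      have hle : sdv.Pairwise (· ≤ ·) := PySem.List.sorted_pairwise dv _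
      have hnd : sdv.Nodup := ((PySem.List.sorted_perm dv _ _).nodup_iff).mpr (nodup_pvDvals _)
      have hlt := pairwise_lt_of_le_nodup sdv hle hnd
      exact hlt.imp (fun {a b} hab => hab)
  have hsorted : items.Pairwise (fun a b => a.2 ≤ b.2) := PySem.List.sorted_pairwise dicto _
  have hB : items.foldl pvGroupStep []
      = (pvDvals (items.map (fun p => p.2))).map (pvBucket items) := pvGroup items hsorted
  have hdvB : pvDvals (items.map (fun p => p.2)) = sdv := by
    refine (PySem.List.sorted_eq_of_perm_of_pairwise_lt _ _ _ ?_ ?_).symm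
    · refine (List.perm_ext_iff_of_nodup (nodup_pvDvals _) (nodup_pvDvals _)).mpr ?_
      intro a
      rw [mem_pvDvals, mem_pvDvals, hvals]
      constructor
      · rintro ha
        rcases List.mem_map.mp ha with ⟨q, hq, rfl⟩
        exact List.mem_map.mpr ⟨q, (PySem.List.mem_sorted _ _ _ _).mp hq, rfl⟩
      · rintro ha
        rcases List.mem_map.mp ha with ⟨q, hq, rfl⟩
        exact List.mem_map.mpr ⟨q, (PySem.List.mem_sorted _ _ _ _).mpr hq, rfl⟩
    · refine pairwise_lt_pvDvals _ ?_
      rw [List.pairwise_map]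
      exact hsorted
  have hbuck : pvBucket items = pvBucket dicto := by
    funext n
    unfold pvBucket
    rw [hitems, pvStab]
  rw [hA, hB, hdvB, hbuck]
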